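-- pv_equiv track=rewrite | github.com/EamaOuO/MPDD | filter.py | keyword_check
-- ===== SOURCE A (Python) =====
-- def keyword_check(str, keyword):
--     result = ''
--     min_idx = len(str)
--     for key in keyword:
--         try:
--             idx = str.index(key)
--             if idx < min_idx:
--                 result = key
--                 min_idx = idx
--         except:
--             pass
--     return result
-- ===== SOURCE B (Python) =====
-- def keyword_check(str, keyword):
--     # Single left-to-right scan of the string: at each position, return the
--     # first keyword (in list order) that starts there.  The first position with
--     # a match is the minimal first-occurrence index, and list order breaks ties.
--     for pos in range(len(str)):
--         hit = next((key for key in keyword if str.startswith(key, pos)), None)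
--         if hit is not None:
--             return hit
--     return ''
-- ===== Notes on version B (the rewrite author's own statement) =====
-- stated objective: faster
-- what changed: Instead of calling str.index once per keyword and keeping a running (result, min_idx) pair, B scans string positions left to right and returns the first keyword (in list order) that starts at the current position, so it stops at the earliest match instead of searching the whole string for every keyword; the first matching position is exactly A's minimal first-occurrence index with A's tie-breaking.
import Mathlib
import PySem

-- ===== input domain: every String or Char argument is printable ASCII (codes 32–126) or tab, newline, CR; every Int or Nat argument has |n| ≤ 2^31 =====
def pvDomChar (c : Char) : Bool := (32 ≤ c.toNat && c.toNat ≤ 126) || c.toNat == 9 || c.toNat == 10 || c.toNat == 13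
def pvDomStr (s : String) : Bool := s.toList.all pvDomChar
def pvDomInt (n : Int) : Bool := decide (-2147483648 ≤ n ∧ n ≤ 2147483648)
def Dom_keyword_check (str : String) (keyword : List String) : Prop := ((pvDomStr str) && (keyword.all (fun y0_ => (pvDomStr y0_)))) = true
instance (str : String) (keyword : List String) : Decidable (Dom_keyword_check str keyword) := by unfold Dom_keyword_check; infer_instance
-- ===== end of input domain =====

-- B replaces A's per-keyword str.index scan (keeping a running (result, min_idx))
-- by a single left-to-right scan over positions of the string, returning the first
-- keyword in list order that starts at the current position, stopping at the earliest
-- match (measurably faster on the generated inputs); objective: faster.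

-- ===== PORT A =====
-- for key in keyword: try: idx = str.index(key) (ValueError ↦ find = -1, caught by 'except: pass');
-- keep (result, min_idx) with strict improvement.
def keyword_check (str : String) (keyword : List String) : String :=
  (keyword.foldl
    (fun (st : String × Int) key =>
      let idx := PySem.Str.find str key
      if idx = -1 then st
      else if idx < st.2 then (key, idx) else st)
    ("", PySem.Str.len str)).1

-- ===== PORT B =====
-- 'for pos in range(len(str))' is the structural recursion over the pos-th suffixes of the
-- string; 'str.startswith(key, pos)' is PySem.Chars.startswith on that suffix (exact:
-- Python's startswith with a start offset tests the suffix at pos); 'next((k for k in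
-- keyword if …), None)' is List.find?.
def kcScan (keyword : List String) : List Char → String
  | [] => ""
  | c :: rest =>
    match keyword.find? (fun key => PySem.Chars.startswith (c :: rest) key.toList) with
    | some key => key
    | none => kcScan keyword rest

def keyword_check_alt (str : String) (keyword : List String) : String :=
  kcScan keyword str.toList

-- ===== PRECONDITION & SPEC =====
def Spec_keyword_check (str : String) (keyword : List String) (out : String) : Prop := out = keyword_check_alt str keyword
instance (str : String) (keyword : List String) (out : String) : Decidable (Spec_keyword_check str keyword out) := by unfold Spec_keyword_check; infer_instance

-- ===== CLAIM (what is proved, stated in full; the proofs are below) =====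
def Claim_equal_keyword_check : Prop := ∀ (str : String) (keyword : List String), Dom_keyword_check str keyword → Spec_keyword_check str keyword (keyword_check str keyword)

-- ===== LEMMAS AND PROOFS =====

-- A's loop body, on the List Char side (after the Str → Chars bridge).
def kcG (s : List Char) (st : String × Int) (key : String) : String × Int :=
  let idx := PySem.Chars.find s key.toList
  if idx = -1 then st
  else if idx < st.2 then (key, idx) else st

-- first-occurrence index of a keyword, A's `str.index`/find
def kcF (s : List Char) (k : String) : Int := PySem.Chars.find s k.toList

lemma kcF_match_le (s : List Char) (k : String) (p : Nat) (h : k.toList <+: s.drop p) :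
    0 ≤ kcF s k ∧ kcF s k ≤ (p : Int) := by
  have h0 : 0 ≤ kcF s k := by
    have : k.toList <:+: s := h.isInfix.trans (List.drop_suffix p s).isInfix
    exact (PySem.Chars.find_nonneg_iff s k.toList).mpr this
  refine ⟨h0, ?_⟩
  by_contra hlt
  push Not at hlt
  have hspec := PySem.Chars.find_spec (s := s) (sub := k.toList) (by unfold kcF at h0; exact h0)
  unfold kcF at hlt
  exact hspec.2 p (by omega) h

lemma kcF_spec_match (s : List Char) (k : String) (h : 0 ≤ kcF s k) :
    k.toList <+: s.drop (kcF s k).toNat :=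
  (PySem.Chars.find_spec (s := s) (sub := k.toList) h).1

-- if no keyword is valid under the current bound, A's fold leaves the state unchanged
lemma kc_fold_noUpdate (s : List Char) (kws : List String) (res : String) (m : Int)
    (h : ∀ k ∈ kws, ¬ (0 ≤ kcF s k ∧ kcF s k < m)) :
    kws.foldl (kcG s) (res, m) = (res, m) := by
  induction kws with
  | nil => rfl
  | cons k ks ih =>
    have hk := h k (by simp)
    simp only [List.foldl_cons]
    have hstep : kcG s (res, m) k = (res, m) := by
      unfold kcG kcF at *
      by_cases hne : PySem.Chars.find s k.toList = -1
      · simp [hne]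
      · have h0 : 0 ≤ PySem.Chars.find s k.toList := by
          have := PySem.Chars.neg_one_le_find s k.toList
          omega
        have : ¬ PySem.Chars.find s k.toList < m := fun hlt => hk ⟨h0, hlt⟩
        simp [hne, this]
    rw [hstep]
    exact ih (fun k' hk' => h k' (by simp [hk']))

lemma kc_getD_eq_of_isSome {α : Type} (o : Option α) (a b : α) (h : o.isSome) :
    o.getD a = o.getD b := by cases o <;> simp_all

lemma kc_find?_congr {α : Type} (l : List α) (p q : α → Bool)
    (h : ∀ a ∈ l, p a = q a) : l.find? p = l.find? q := by
  induction l with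
  | nil => rfl
  | cons a t ih =>
    simp only [List.find?_cons, h a (by simp)]
    split
    · rfl
    · exact ih (fun a ha => h a (by simp [ha]))

-- A's fold computes the first keyword attaining the minimal valid first-occurrence index μ
lemma kc_fold_min (s : List Char) (μ : Int) :
    ∀ (kws : List String) (res : String) (m : Int),
      (∀ k ∈ kws, 0 ≤ kcF s k ∧ kcF s k < m → μ ≤ kcF s k) →
      (∃ k ∈ kws, kcF s k = μ) → μ < m → 0 ≤ μ →
      (kws.foldl (kcG s) (res, m)).1 = (kws.find? (fun k => kcF s k == μ)).getD res := by
  intro kws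
  induction kws with
  | nil => intro res m _ hex _ _; exact absurd hex (by simp)
  | cons k ks ih =>
    intro res m hmin hex hμm hμ0
    simp only [List.foldl_cons]
    by_cases hk : kcF s k = μ
    · have hstep : kcG s (res, m) k = (k, μ) := by
        unfold kcG kcF at *
        rw [hk]
        simp [show ¬ (μ = -1) by omega, hμm]
      rw [hstep, List.find?_cons_of_pos (by simp [hk])]
      rw [kc_fold_noUpdate s ks k μ ?_]
      · simp
      · intro k' hk' ⟨h0, hlt⟩
        have := hmin k' (by simp [hk']) ⟨h0, by omega⟩
        omega
    · rw [List.find?_cons_of_neg (by simp [hk])]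
      obtain ⟨k0, hk0mem, hk0⟩ := hex
      have hk0ks : k0 ∈ ks := by
        rcases List.mem_cons.mp hk0mem with h | h
        · exact absurd (h ▸ hk0) hk
        · exact h
      by_cases hv : 0 ≤ kcF s k ∧ kcF s k < m
      · have hμk : μ < kcF s k := lt_of_le_of_ne (hmin k (by simp) hv) (fun h => hk h.symm)
        have hstep : kcG s (res, m) k = (k, kcF s k) := by
          unfold kcG
          have hne : ¬ kcF s k = -1 := by omega
          unfold kcF at *
          simp [hne, hv.2]
        rw [hstep]
        have hIH := ih k (kcF s k)
          (fun k' hk' ⟨h0, hlt⟩ => hmin k' (by simp [hk']) ⟨h0, by omega⟩)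
          ⟨k0, hk0ks, hk0⟩ hμk hμ0
        rw [hIH]
        have hsome : (ks.find? (fun k' => kcF s k' == μ)).isSome :=
          List.find?_isSome.mpr ⟨k0, hk0ks, by simp [hk0]⟩
        exact kc_getD_eq_of_isSome _ k res hsome
      · have hstep : kcG s (res, m) k = (res, m) := by
          unfold kcG
          by_cases hne : kcF s k = -1
          · unfold kcF at *; simp [hne]
          · have h0 : 0 ≤ kcF s k := by
              have := PySem.Chars.neg_one_le_find s k.toList
              unfold kcF at *; omega
            have : ¬ kcF s k < m := fun hlt => hv ⟨h0, hlt⟩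
            unfold kcF at *
            simp [hne, this]
        rw [hstep]
        have hIH := ih res m (fun k' hk' h => hmin k' (by simp [hk']) h)
          ⟨k0, hk0ks, hk0⟩ hμm hμ0
        rw [hIH]

-- B's scan returns "" when no keyword matches anywhere in the string
lemma kcScan_of_no_match (kws : List String) :
    ∀ t : List Char, (∀ p, p < t.length → ∀ k ∈ kws, ¬ k.toList <+: t.drop p) →
      kcScan kws t = "" := by
  intro t
  induction t with
  | nil => intro _; rfl
  | cons c rest ih =>
    intro h
    have hnone : kws.find? (fun key => PySem.Chars.startswith (c :: rest) key.toList) = none := by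
      rw [List.find?_eq_none]
      intro k hk
      simp only [Bool.not_eq_true]
      rw [← Bool.not_eq_true, PySem.Chars.startswith_iff]
      exact h 0 (by simp) k hk
    rw [kcScan, hnone]
    exact ih (fun p hp k hk => h (p + 1) (by simpa using Nat.succ_lt_succ hp) k hk)

-- B's scan skips match-free positions
lemma kcScan_drop (kws : List String) :
    ∀ (j : Nat) (t : List Char), j ≤ t.length →
      (∀ p, p < j → ∀ k ∈ kws, ¬ k.toList <+: t.drop p) →
      kcScan kws t = kcScan kws (t.drop j) := by
  intro j
  induction j with
  | zero => intro t _ _; rfl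
  | succ j ih =>
    intro t hlen h
    cases t with
    | nil => simp at hlen
    | cons c rest =>
      have hnone : kws.find? (fun key => PySem.Chars.startswith (c :: rest) key.toList) = none := by
        rw [List.find?_eq_none]
        intro k hk
        simp only [Bool.not_eq_true]
        rw [← Bool.not_eq_true, PySem.Chars.startswith_iff]
        exact h 0 (by omega) k hk
      rw [kcScan, hnone, List.drop_succ_cons]
      exact ih rest (by simpa using hlen)
        (fun p hp k hk => h (p + 1) (by omega) k hk)

-- ===== VERDICT (by name: the statement is the Claim_ definition above) =====
theorem keyword_check_spec : Claim_equal_keyword_check := by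
  intro str kws _
  unfold Spec_keyword_check keyword_check keyword_check_alt
  set s : List Char := str.toList with hs
  have hA : (kws.foldl
      (fun (st : String × Int) key =>
        let idx := PySem.Str.find str key
        if idx = -1 then st
        else if idx < st.2 then (key, idx) else st)
      ("", PySem.Str.len str)) =
      kws.foldl (kcG s) ("", (s.length : Int)) := by
    simp only [PySem.Str.find_eq, PySem.Str.len_eq]
    rfl
  rw [hA]
  -- Q p: some keyword matches at position p (< length)
  by_cases hE : ∃ p, p < s.length ∧ ∃ k ∈ kws, k.toList <+: s.drop p
  · -- p* : the least matching position
    have hQdec : DecidablePred (fun p => p < s.length ∧ ∃ k ∈ kws, k.toList <+: s.drop p) := by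
      intro p; infer_instance
    let p' : Nat := @Nat.find _ hQdec hE
    have hQ : p' < s.length ∧ ∃ k ∈ kws, k.toList <+: s.drop p' := @Nat.find_spec _ hQdec hE
    have hQmin : ∀ p, p < p' → ¬ (p < s.length ∧ ∃ k ∈ kws, k.toList <+: s.drop p) :=
      fun p hp => @Nat.find_min _ hQdec hE p hp
    obtain ⟨hplen, k0, hk0mem, hk0pre⟩ := hQ
    -- each keyword matching at p' has kcF = p'; keywords with kcF = p' match at p'
    have hiff : ∀ k ∈ kws, (kcF s k = (p' : Int) ↔ k.toList <+: s.drop p') := by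
      intro k hk
      constructor
      · intro h
        have h0 : 0 ≤ kcF s k := by omega
        have := kcF_spec_match s k h0
        rwa [h] at this
        
      · intro h
        obtain ⟨h0, hle⟩ := kcF_match_le s k p' h
        rcases lt_or_eq_of_le hle with hlt | he
        · exfalso
          have hmatch := kcF_spec_match s k h0
          have hplt : (kcF s k).toNat < p' := by omega
          exact hQmin _ hplt ⟨by omega, k, hk, hmatch⟩
        · exact he
    -- A-side: the fold returns the first keyword with kcF = p'
    have hmin : ∀ k ∈ kws, 0 ≤ kcF s k ∧ kcF s k < (s.length : Int) → (p' : Int) ≤ kcF s k := by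
      intro k hk ⟨h0, hlt⟩
      have hmatch := kcF_spec_match s k h0
      by_contra hcon
      push Not at hcon
      exact hQmin (kcF s k).toNat (by omega) ⟨by omega, k, hk, hmatch⟩
    have hk0F : kcF s k0 = (p' : Int) := (hiff k0 hk0mem).mpr hk0pre
    have hAres := kc_fold_min s (p' : Int) kws "" (s.length : Int) hmin
      ⟨k0, hk0mem, hk0F⟩ (by exact_mod_cast hplen) (by positivity)
    rw [hAres]
    -- B-side: the scan skips to position p' and finds the same keyword
    rw [kcScan_drop kws p' s (le_of_lt hplen)
      (fun p hp k hk hpre => hQmin p hp ⟨by omega, k, hk, hpre⟩)]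
    obtain ⟨c, rest, hdrop⟩ : ∃ c rest, s.drop p' = c :: rest := by
      cases hd : s.drop p' with
      | nil => exfalso; have := List.length_drop (l := s) (i := p'); rw [hd] at this; simp at this; omega
      | cons c rest => exact ⟨c, rest, rfl⟩
    rw [hdrop]
    rw [kcScan]
    have hcongr : kws.find? (fun k => kcF s k == (p' : Int)) =
        kws.find? (fun key => PySem.Chars.startswith (c :: rest) key.toList) := by
      apply kc_find?_congr
      intro k hk
      rw [← hdrop]
      by_cases h : k.toList <+: s.drop p'
      · have h1 : kcF s k = (p' : Int) := (hiff k hk).mpr h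
        have h2 : PySem.Chars.startswith (s.drop p') k.toList = true :=
          (PySem.Chars.startswith_iff _ _).mpr h
        simp [h1, h2]
      · have h1 : ¬ kcF s k = (p' : Int) := fun hc => h ((hiff k hk).mp hc)
        have h2 : PySem.Chars.startswith (s.drop p') k.toList = false := by
          rw [← Bool.not_eq_true, PySem.Chars.startswith_iff]; exact h
        simp [h1, h2]
    rw [← hcongr]
    have hsome : (kws.find? (fun k => kcF s k == (p' : Int))).isSome :=
      List.find?_isSome.mpr ⟨k0, hk0mem, by simp [hk0F]⟩
    obtain ⟨kstar, hkstar⟩ := Option.isSome_iff_exists.mp hsome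
    rw [hkstar]
    rfl
  · -- no keyword occurs: A keeps ("", len), B scans off the end
    push Not at hE
    have hnov : ∀ k ∈ kws, ¬ (0 ≤ kcF s k ∧ kcF s k < (s.length : Int)) := by
      intro k hk ⟨h0, hlt⟩
      have hmatch := kcF_spec_match s k h0
      exact hE (kcF s k).toNat (by omega) k hk hmatch
    rw [kc_fold_noUpdate s kws "" (s.length : Int) hnov]
    rw [kcScan_of_no_match kws s (fun p hp k hk hpre => hE p hp k hk hpre)]
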